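-- pv_equiv track=rewrite | github.com/rslabon/aoc2025 | day2.py | find_invalid
-- ===== SOURCE A (Python) =====
-- def find_invalid(start, end):
--     result = set()
--     for n in range(start, end + 1):
--         s = str(n)
--         if len(s) % 2 == 0:
--             mid = len(s) // 2
--             if s[0:mid] == s[mid:]:
--                 result.add(n)
--
--     return result
-- ===== SOURCE B (Python) =====
-- def find_invalid(start, end):
--     # Enumerate candidates h * (10**k + 1) directly instead of scanning the range.
--     result = set()
--     p = 10  # 10**k, k = 1, 2, ...
--     while (p // 10) * (p + 1) <= end:
--         m = p + 1
--         lo = max(p // 10, -(-start // m))  # ceil(start / m)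
--         hi = min(p - 1, end // m)
--         for h in range(lo, hi + 1):
--             result.add(h * m)
--         p *= 10
--     return result
-- ===== Notes on version B (the rewrite author's own statement) =====
-- stated objective: faster
-- what changed: Instead of scanning every integer in [start, end] and testing its decimal string, B directly enumerates the matching numbers h*(10^k+1) for each half-length k and each in-range half-value h.
import Mathlib
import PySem

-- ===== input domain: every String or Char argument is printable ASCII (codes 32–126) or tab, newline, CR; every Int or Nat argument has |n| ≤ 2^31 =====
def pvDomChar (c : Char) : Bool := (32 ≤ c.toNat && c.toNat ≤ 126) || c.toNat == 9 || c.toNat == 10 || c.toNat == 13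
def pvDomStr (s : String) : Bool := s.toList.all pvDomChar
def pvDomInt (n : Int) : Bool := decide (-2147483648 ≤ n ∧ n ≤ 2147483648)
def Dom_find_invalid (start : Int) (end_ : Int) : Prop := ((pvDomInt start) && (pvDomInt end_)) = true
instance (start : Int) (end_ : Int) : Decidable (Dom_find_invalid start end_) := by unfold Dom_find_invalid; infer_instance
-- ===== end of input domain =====

-- B replaces A's per-number string test over the whole range [start, end] by a direct
-- enumeration of the candidates h * (10^k + 1) (h of k digits) that lie in the range.

-- ===== PORT A =====
def find_invalid (start : Int) (end_ : Int) : List Int :=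
  (PySem.List.pyRange start (end_ + 1)).foldl (fun result n =>
    let s := PySem.Int.toChars n
    if PySem.Int.mod (s.length : Int) 2 = 0 then
      let mid := PySem.Int.floordiv (s.length : Int) 2
      if PySem.List.slice s (some 0) (some mid) = PySem.List.slice s (some mid) none then
        PySem.Set.add result n
      else result
    else result) []

-- ===== PORT B =====
-- the while loop of Source B, ported with explicit fuel (the loop exits on its own condition;
-- the fuel is large enough, see lemmas below)
def find_invalid_alt_loop (start : Int) (end_ : Int) : Nat → Int → List Int → List Int
  | 0, _, result => result
  | fuel + 1, p, result =>
    if PySem.Int.floordiv p 10 * (p + 1) ≤ end_ then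
      let m := p + 1
      let lo := max (PySem.Int.floordiv p 10) (-(PySem.Int.floordiv (-start) m))
      let hi := min (p - 1) (PySem.Int.floordiv end_ m)
      find_invalid_alt_loop start end_ fuel (p * 10)
        ((PySem.List.pyRange lo (hi + 1)).foldl (fun r h => PySem.Set.add r (h * m)) result)
    else result

def find_invalid_alt (start : Int) (end_ : Int) : List Int :=
  find_invalid_alt_loop start end_ (end_.toNat + 1) 10 []

-- ===== PRECONDITION & SPEC =====
def Spec_find_invalid (start : Int) (end_ : Int) (out : List Int) : Prop := out = find_invalid_alt start end_
instance (start : Int) (end_ : Int) (out : List Int) : Decidable (Spec_find_invalid start end_ out) := by unfold Spec_find_invalid; infer_instance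

-- ===== CLAIM (what is proved, stated in full; the proofs are below) =====
def Claim_equal_find_invalid : Prop := ∀ (start : Int) (end_ : Int), Dom_find_invalid start end_ → Spec_find_invalid start end_ (find_invalid start end_)

-- ===== LEMMAS AND PROOFS =====

/-- The numbers A collects: some k-digit half h repeated twice, i.e. h * (10^k + 1). -/
def pvQual (n : Int) : Prop :=
  ∃ k h : ℕ, 1 ≤ k ∧ 10 ^ (k - 1) ≤ h ∧ h < 10 ^ k ∧ n = (h : Int) * (10 ^ k + 1)

/-- A's per-element test, as a single boolean. -/
def pvCondA (n : Int) : Bool :=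
  let s := PySem.Int.toChars n
  decide (PySem.Int.mod (s.length : Int) 2 = 0) &&
  decide (PySem.List.slice s (some 0) (some (PySem.Int.floordiv (s.length : Int) 2)) =
          PySem.List.slice s (some (PySem.Int.floordiv (s.length : Int) 2)) none)

lemma pvStepA (result : List Int) (n : Int) :
    (let s := PySem.Int.toChars n
     if PySem.Int.mod (s.length : Int) 2 = 0 then
       let mid := PySem.Int.floordiv (s.length : Int) 2
       if PySem.List.slice s (some 0) (some mid) = PySem.List.slice s (some mid) none then
         PySem.Set.add result n
       else result
     else result) = if pvCondA n then PySem.Set.add result n else result := by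
  simp only [pvCondA]
  split_ifs with h1 h2 h3 h3 <;> simp_all

lemma pvToDigitsCore_eq (f : ℕ) : ∀ (n : ℕ) (ds : List Char), n ≠ 0 → n < f →
    Nat.toDigitsCore 10 f n ds = ((Nat.digits 10 n).map Nat.digitChar).reverse ++ ds := by
  induction f with
  | zero => intro n ds hn hf; omega
  | succ f ih =>
    intro n ds hn hf
    rw [Nat.toDigitsCore]
    by_cases h : n / 10 = 0
    · simp only [h, if_pos]
      rw [Nat.digits_def' (by norm_num : 1 < 10) (Nat.pos_of_ne_zero hn), h]
      simp [Nat.mod_eq_of_lt (by omega : n < 10)]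
    · simp only [h]
      rw [ih (n / 10) _ h (by omega)]
      rw [Nat.digits_def' (by norm_num : 1 < 10) (Nat.pos_of_ne_zero hn)]
      simp

lemma pvToDigits_eq {n : ℕ} (hn : n ≠ 0) :
    Nat.toDigits 10 n = ((Nat.digits 10 n).map Nat.digitChar).reverse := by
  have := pvToDigitsCore_eq (n + 1) n [] hn (by omega)
  simpa [Nat.toDigits] using this

lemma pvDigitChar_ne (d : ℕ) (h : d < 10) : Nat.digitChar d ≠ '-' := by
  interval_cases d <;> decide

lemma pvMap_digitChar_inj : ∀ (xs ys : List ℕ), (∀ x ∈ xs, x < 10) → (∀ y ∈ ys, y < 10) →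
    xs.map Nat.digitChar = ys.map Nat.digitChar → xs = ys := by
  intro xs
  induction xs with
  | nil => intro ys _ _ h; simpa using (List.map_eq_nil_iff.mp h.symm)
  | cons x xs ih =>
    intro ys hx hy h
    cases ys with
    | nil => simp at h
    | cons y ys =>
      simp only [List.map_cons, List.cons.injEq] at h
      have key : ∀ a : ℕ, a < 10 → ∀ b : ℕ, b < 10 → Nat.digitChar a = Nat.digitChar b → a = b := by
        decide
      have hxy : x = y := key x (hx x (by simp)) y (hy y (by simp)) h.1
      rw [hxy, ih ys (fun a ha => hx a (by simp [ha])) (fun a ha => hy a (by simp [ha])) h.2]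

lemma pvQual_pos {n : Int} (h : pvQual n) : 0 < n := by
  obtain ⟨k, h', hk, hlb, hub, rfl⟩ := h
  have h1 : (1:Int) ≤ (h' : Int) := by
    have : 1 ≤ h' := le_trans (Nat.one_le_pow _ _ (by norm_num)) hlb
    exact_mod_cast this
  nlinarith [pow_pos (by norm_num : (0:Int) < 10) k]

lemma pvCondA_eq (n : Int) : (pvCondA n = true) ↔
    ((PySem.Int.toChars n).length % 2 = 0 ∧
      (PySem.Int.toChars n).take ((PySem.Int.toChars n).length / 2) =
      (PySem.Int.toChars n).drop ((PySem.Int.toChars n).length / 2)) := by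
  unfold pvCondA
  simp only []
  set s := PySem.Int.toChars n with hs
  have h1 : PySem.Int.mod (s.length : Int) 2 = ((s.length % 2 : ℕ) : Int) := by
    rw [PySem.Int.mod_eq_emod_of_pos (by norm_num)]; omega
  have h2 : PySem.Int.floordiv (s.length : Int) 2 = ((s.length / 2 : ℕ) : Int) := by
    rw [PySem.Int.floordiv_eq_ediv_of_pos (by norm_num)]; omega
  simp only [h1, h2, PySem.List.slice_zero_start, PySem.List.slice_to_natCast,
    PySem.List.slice_from_natCast, Bool.and_eq_true, decide_eq_true_eq]
  constructor <;> rintro ⟨ha, hb⟩ <;> exact ⟨by omega, hb⟩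

/-- core characterization on the digit list -/
lemma pvDigits_halves (m : ℕ) (hm : m ≠ 0) :
    ((Nat.digits 10 m).length % 2 = 0 ∧
      (Nat.digits 10 m).take ((Nat.digits 10 m).length / 2) =
      (Nat.digits 10 m).drop ((Nat.digits 10 m).length / 2)) ↔ pvQual (m : Int) := by
  constructor
  · rintro ⟨heven, heq⟩
    set ds := Nat.digits 10 m with hds
    have hne : ds ≠ [] := Nat.digits_ne_nil_iff_ne_zero.mpr hm
    set k := ds.length / 2 with hk
    have hlen0 : ds.length ≠ 0 := by simpa [List.length_eq_zero_iff] using hne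
    have hlen : ds.length = 2 * k := by omega
    have hk1 : 1 ≤ k := by omega
    set t := ds.drop k with ht
    have htlen : t.length = k := by simp [ht]; omega
    have hsplit : ds = t ++ t := by
      conv_lhs => rw [← List.take_append_drop k ds]
      rw [heq]
    set h := Nat.ofDigits 10 t with hh
    have hlt : ∀ d ∈ t, d < 10 := fun d hd => Nat.digits_lt_base (by norm_num) (by
      rw [hds] at *; exact List.mem_of_mem_drop hd)
    have hlast : ∀ (hne' : t ≠ []), t.getLast hne' ≠ 0 := by
      intro hne'
      have h1 : ds.getLast? = t.getLast? := by
        conv_lhs => rw [hsplit]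
        exact List.getLast?_append_of_ne_nil t hne'
      have h2 : ds.getLast? = some (ds.getLast hne) := List.getLast?_eq_some_getLast hne
      have h3 : t.getLast? = some (t.getLast hne') := List.getLast?_eq_some_getLast hne'
      have h4 : ds.getLast hne = t.getLast hne' := by
        have := h2.symm.trans (h1.trans h3); injection this
      rw [← h4]
      exact Nat.getLast_digit_ne_zero 10 hm
    have hdig : Nat.digits 10 h = t := Nat.digits_ofDigits 10 (by norm_num) t hlt hlast
    have hub : h < 10 ^ k :=
      (Nat.digits_length_le_iff (by norm_num : 1 < 10) h).mp (le_of_eq (by rw [hdig, htlen]))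
    have hlb : 10 ^ (k - 1) ≤ h := by
      by_contra hcon
      push Not at hcon
      have := (Nat.digits_length_le_iff (by norm_num : 1 < 10) h).mpr hcon
      rw [hdig, htlen] at this; omega
    have hm_eq : m = h + 10 ^ k * h := by
      conv_lhs => rw [← Nat.ofDigits_digits 10 m, ← hds, hsplit]
      rw [Nat.ofDigits_append, htlen]
    refine ⟨k, h, hk1, hlb, hub, ?_⟩
    push_cast [hm_eq]; ring
  · rintro ⟨k, h, hk1, hlb, hub, hmh⟩
    have hmn : m = h * (10 ^ k + 1) := by exact_mod_cast hmh
    have hh0 : h ≠ 0 := by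
      intro hc; rw [hc] at hlb; simp at hlb
    set t := Nat.digits 10 h with ht
    have htlen : t.length = k := by
      have h1 : t.length ≤ k := (Nat.digits_length_le_iff (by norm_num : 1 < 10) h).mpr hub
      have h2 : ¬ t.length ≤ k - 1 := fun hc =>
        absurd ((Nat.digits_length_le_iff (by norm_num : 1 < 10) h).mp hc) (by omega)
      omega
    have hlt : ∀ d ∈ t ++ t, d < 10 := by
      intro d hd
      rcases List.mem_append.mp hd with hd | hd <;> exact Nat.digits_lt_base (by norm_num) hd
    have htne : t ≠ [] := Nat.digits_ne_nil_iff_ne_zero.mpr hh0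
    have hlast : ∀ (hne' : t ++ t ≠ []), (t ++ t).getLast hne' ≠ 0 := by
      intro hne'
      have h1 : (t ++ t).getLast? = t.getLast? := List.getLast?_append_of_ne_nil t htne
      have h2 : (t ++ t).getLast? = some ((t ++ t).getLast hne') := List.getLast?_eq_some_getLast hne'
      have h3 : t.getLast? = some (t.getLast htne) := List.getLast?_eq_some_getLast htne
      have h4 : (t ++ t).getLast hne' = t.getLast htne := by injection (h2.symm.trans (h1.trans h3))
      rw [h4]
      exact Nat.getLast_digit_ne_zero 10 hh0
    have hofd : Nat.ofDigits 10 (t ++ t) = m := by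
      rw [Nat.ofDigits_append, htlen, Nat.ofDigits_digits, hmn]; ring
    have hdig : Nat.digits 10 m = t ++ t := by
      rw [← hofd]; exact Nat.digits_ofDigits 10 (by norm_num) _ hlt hlast
    rw [hdig]
    have hlen : (t ++ t).length = 2 * k := by simp [htlen]; ring
    constructor
    · omega
    · have hk2 : (t ++ t).length / 2 = k := by omega
      rw [hk2, List.take_append_of_le_length (by omega), List.drop_append_of_le_length (by omega), ← htlen]
      simp

lemma pvCondA_iff (n : Int) : pvCondA n = true ↔ pvQual n := by
  rw [pvCondA_eq]
  rcases lt_trichotomy n 0 with hneg | rfl | hpos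
  · constructor
    · rintro ⟨heven, heq⟩
      exfalso
      have hna : n.natAbs ≠ 0 := by omega
      have hs : PySem.Int.toChars n = '-' :: ((Nat.digits 10 n.natAbs).map Nat.digitChar).reverse := by
        unfold PySem.Int.toChars
        rw [if_pos hneg, pvToDigits_eq hna]
      set R := ((Nat.digits 10 n.natAbs).map Nat.digitChar).reverse with hR
      have hlenR : R.length = (Nat.digits 10 n.natAbs).length := by simp [hR]
      have hdne : (Nat.digits 10 n.natAbs).length ≠ 0 := by
        simpa [List.length_eq_zero_iff] using Nat.digits_ne_nil_iff_ne_zero.mpr hna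
      have hlen : (PySem.Int.toChars n).length = R.length + 1 := by rw [hs]; simp
      set s := PySem.Int.toChars n with hsdef
      set k := s.length / 2 with hk
      have hk1 : 1 ≤ k := by omega
      have hkR : k - 1 < R.length := by omega
      have h1 : (s.take k).head? = some '-' := by
        rw [List.head?_take]
        simp [show ¬ k = 0 by omega, hs]
      have h2 : (s.drop k).head? = R[k-1]? := by
        rw [List.head?_drop, hs]
        conv_lhs => rw [show k = (k-1)+1 from by omega]
        exact List.getElem?_cons_succ
      have h3 : R[k-1]? = some (R[k-1]'hkR) := List.getElem?_eq_getElem hkR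
      have hall : ∀ c ∈ R, c ≠ '-' := by
        intro c hc
        rw [hR] at hc
        simp only [List.mem_reverse, List.mem_map] at hc
        obtain ⟨d, hd, rfl⟩ := hc
        exact pvDigitChar_ne d (Nat.digits_lt_base (by norm_num) hd)
      rw [heq, h2, h3] at h1
      exact hall _ (List.getElem_mem hkR) (by injection h1)
    · intro h; exact absurd (pvQual_pos h) (by omega)
  · constructor
    · rintro ⟨heven, -⟩
      exfalso; revert heven; decide
    · intro h; exact absurd (pvQual_pos h) (by omega)
  · obtain ⟨m, rfl⟩ : ∃ m : ℕ, n = (m : Int) := ⟨n.toNat, by omega⟩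
    have hm : m ≠ 0 := by omega
    have hs : PySem.Int.toChars (m : Int) = ((Nat.digits 10 m).map Nat.digitChar).reverse := by
      unfold PySem.Int.toChars
      rw [if_neg (by omega), pvToDigits_eq (by simpa using hm)]
      simp
    rw [hs, ← pvDigits_halves m hm]
    set ds := Nat.digits 10 m with hds
    set R := ds.map Nat.digitChar with hR
    have hRlen : R.length = ds.length := by simp [hR]
    have hlen : R.reverse.length = ds.length := by simp [hR]
    rw [hlen]
    constructor
    · rintro ⟨heven, heq⟩
      refine ⟨heven, ?_⟩
      set k := ds.length / 2 with hk
      rw [List.take_reverse, List.drop_reverse] at heq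
      have h2 : R.drop (R.length - k) = R.take (R.length - k) := List.reverse_injective heq
      have hlk : R.length - k = k := by rw [hRlen]; omega
      rw [hlk] at h2
      have h3 : ds.drop k = ds.take k := by
        apply pvMap_digitChar_inj
        · exact fun x hx => Nat.digits_lt_base (by norm_num) (List.mem_of_mem_drop hx)
        · exact fun x hx => Nat.digits_lt_base (by norm_num) (List.mem_of_mem_take hx)
        · simpa [hR, List.map_drop, List.map_take] using h2
      exact h3.symm
    · rintro ⟨heven, heq⟩
      refine ⟨heven, ?_⟩
      set k := ds.length / 2 with hk
      rw [List.take_reverse, List.drop_reverse]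
      have hlk : R.length - k = k := by rw [hRlen]; omega
      rw [hlk]
      congr 1
      rw [hR, ← List.map_drop, ← List.map_take, heq]

/-- A's fold with `Set.add` is a filter. -/
lemma pvFoldA (xs : List Int) : ∀ (acc : List Int), xs.Nodup → (∀ x ∈ xs, x ∉ acc) →
    xs.foldl (fun r n => if pvCondA n then PySem.Set.add r n else r) acc =
      acc ++ xs.filter pvCondA := by
  induction xs with
  | nil => simp
  | cons x xs ih =>
    intro acc hnd hfresh
    simp only [List.foldl_cons, List.filter_cons]
    rcases List.nodup_cons.mp hnd with ⟨hx, hnd'⟩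
    by_cases hc : pvCondA x
    · rw [if_pos hc, if_pos hc, PySem.Set.add_of_not_mem (hfresh x (by simp))]
      rw [ih (acc ++ [x]) hnd' ?_]
      · simp
      · intro y hy
        simp only [List.mem_append, List.mem_singleton]
        rintro (h | rfl)
        · exact hfresh y (by simp [hy]) h
        · exact hx hy
    · rw [if_neg (by simp [hc]), if_neg (by simp [hc])]
      exact ih acc hnd' (fun y hy => hfresh y (by simp [hy]))

lemma pvA_eq_filter (start end_ : Int) :
    find_invalid start end_ = (PySem.List.pyRange start (end_ + 1)).filter pvCondA := by
  unfold find_invalid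
  have h : (fun (result : List Int) (n : Int) =>
      let s := PySem.Int.toChars n
      if PySem.Int.mod (s.length : Int) 2 = 0 then
        let mid := PySem.Int.floordiv (s.length : Int) 2
        if PySem.List.slice s (some 0) (some mid) = PySem.List.slice s (some mid) none then
          PySem.Set.add result n
        else result
      else result) = fun r n => if pvCondA n then PySem.Set.add r n else r := by
    funext r n; exact pvStepA r n
  rw [h, pvFoldA _ [] (PySem.List.nodup_pyRange_one _ _) (by simp)]
  simp

/-- membership in B's inner block at half-length k -/
def pvBlock (start end_ : Int) (k : ℕ) (n : Int) : Prop :=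
  ∃ h : Int, max ((10:Int) ^ (k - 1)) (-(PySem.Int.floordiv (-start) ((10:Int) ^ k + 1))) ≤ h ∧
    h < min ((10:Int) ^ k - 1) (PySem.Int.floordiv end_ ((10:Int) ^ k + 1)) + 1 ∧
    n = h * ((10:Int) ^ k + 1)

lemma pvFoldAdd (ys : List Int) : ∀ (acc : List Int), (∀ y ∈ ys, y ∉ acc) → ys.Nodup →
    ys.foldl (fun r y => PySem.Set.add r y) acc = acc ++ ys := by
  induction ys with
  | nil => simp
  | cons y ys ih =>
    intro acc hfresh hnd
    rcases List.nodup_cons.mp hnd with ⟨hy, hnd'⟩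
    simp only [List.foldl_cons]
    rw [PySem.Set.add_of_not_mem (hfresh y (by simp))]
    rw [ih (acc ++ [y]) ?_ hnd']
    · simp
    · intro z hz
      simp only [List.mem_append, List.mem_singleton]
      rintro (h | rfl)
      · exact hfresh z (by simp [hz]) h
      · exact hy hz

lemma pvPowDiv (j : ℕ) (hj : 1 ≤ j) : PySem.Int.floordiv ((10:Int) ^ j) 10 = 10 ^ (j - 1) := by
  rw [PySem.Int.floordiv_eq_ediv_of_pos (by norm_num)]
  have h : (10:Int) ^ j = 10 ^ (j - 1) * 10 := by
    rw [← pow_succ]; congr 1; omega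
  rw [h, Int.mul_ediv_cancel _ (by norm_num)]

lemma pvCondMono (j k : ℕ) (hj : 1 ≤ j) (hjk : j ≤ k) :
    (10:Int) ^ (j - 1) * (10 ^ j + 1) ≤ 10 ^ (k - 1) * (10 ^ k + 1) := by
  have h1 : (10:Int) ^ (j - 1) ≤ 10 ^ (k - 1) := pow_le_pow_right₀ (by norm_num) (by omega)
  have h2 : (10:Int) ^ j ≤ 10 ^ k := pow_le_pow_right₀ (by norm_num) hjk
  exact mul_le_mul h1 (by omega) (by positivity) (by positivity)

lemma pvBlock_iff' (start end_ : Int) (k : ℕ) (n : Int) (_hk : 1 ≤ k) :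
    pvBlock start end_ k n ↔
      ∃ h : Int, 10 ^ (k - 1) ≤ h ∧ h < 10 ^ k ∧ start ≤ n ∧ n ≤ end_ ∧ n = h * (10 ^ k + 1) := by
  unfold pvBlock
  have hm : (0:Int) < 10 ^ k + 1 := by positivity
  constructor
  · rintro ⟨h, hlo, hhi, rfl⟩
    have hlo1 : (10:Int) ^ (k - 1) ≤ h := le_trans (le_max_left _ _) hlo
    have hlo2 : -(PySem.Int.floordiv (-start) (10 ^ k + 1)) ≤ h := le_trans (le_max_right _ _) hlo
    have hhi1 : h ≤ (10:Int) ^ k - 1 := by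
      have := le_min_iff.mp (by omega : h ≤ min ((10:Int) ^ k - 1) (PySem.Int.floordiv end_ (10 ^ k + 1)))
      exact this.1
    have hhi2 : h ≤ PySem.Int.floordiv end_ (10 ^ k + 1) := by
      have := le_min_iff.mp (by omega : h ≤ min ((10:Int) ^ k - 1) (PySem.Int.floordiv end_ (10 ^ k + 1)))
      exact this.2
    have hstart : start ≤ h * (10 ^ k + 1) := by
      rw [PySem.Int.floordiv_eq_ediv_of_pos hm] at hlo2
      have h1 : -h ≤ (-start) / (10 ^ k + 1) := by omega
      have h2 := (Int.le_ediv_iff_mul_le hm).mp h1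
      nlinarith
    have hend : h * (10 ^ k + 1) ≤ end_ := (PySem.Int.le_floordiv_iff_mul_le hm).mp hhi2
    exact ⟨h, hlo1, by omega, hstart, hend, rfl⟩
  · rintro ⟨h, hlo1, hhi1, hstart, hend, rfl⟩
    refine ⟨h, ?_, ?_, rfl⟩
    · rw [max_le_iff]
      refine ⟨hlo1, ?_⟩
      rw [PySem.Int.floordiv_eq_ediv_of_pos hm]
      have h2 : (-h) * (10 ^ k + 1) ≤ -start := by nlinarith
      have := (Int.le_ediv_iff_mul_le hm).mpr h2
      omega
    · have h2 : h ≤ PySem.Int.floordiv end_ (10 ^ k + 1) :=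
        (PySem.Int.le_floordiv_iff_mul_le hm).mpr hend
      have h3 : h ≤ (10:Int) ^ k - 1 := by omega
      omega

lemma pvBlock_bounds (start end_ : Int) (k : ℕ) (n : Int) (hk : 1 ≤ k)
    (h : pvBlock start end_ k n) :
    (10:Int) ^ (k - 1) * (10 ^ k + 1) ≤ n ∧ n ≤ (10 ^ k - 1) * (10 ^ k + 1) ∧ n ≤ end_ := by
  obtain ⟨h', hlo, hhi, hs, he, rfl⟩ := (pvBlock_iff' start end_ k n hk).mp h
  have hm : (0:Int) < 10 ^ k + 1 := by positivity
  refine ⟨?_, ?_, he⟩ <;> nlinarith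

lemma pvLoop_spec (start end_ : Int) : ∀ (fuel : ℕ) (j : ℕ) (acc : List Int), 1 ≤ j →
    end_ < 10 ^ (j - 1 + fuel) * (10 ^ (j + fuel) + 1) →
    acc.Pairwise (· < ·) →
    (∀ x ∈ acc, x < (10:Int) ^ (j - 1) * (10 ^ j + 1)) →
    (find_invalid_alt_loop start end_ fuel (10 ^ j) acc).Pairwise (· < ·) ∧
    (∀ n, n ∈ find_invalid_alt_loop start end_ fuel (10 ^ j) acc ↔
      n ∈ acc ∨ ∃ k, j ≤ k ∧ pvBlock start end_ k n) := by
  intro fuel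
  induction fuel with
  | zero =>
    intro j acc hj hfuel hpw hbound
    simp only [find_invalid_alt_loop]
    refine ⟨hpw, fun n => ⟨fun h => Or.inl h, ?_⟩⟩
    rintro (h | ⟨k, hjk, hblk⟩)
    · exact h
    · exfalso
      obtain ⟨hlb, -, hub⟩ := pvBlock_bounds start end_ k n (by omega) hblk
      have := pvCondMono j k hj hjk
      simp only [Nat.add_zero] at hfuel
      omega
  | succ fuel ih =>
    intro j acc hj hfuel hpw hbound
    simp only [find_invalid_alt_loop, pvPowDiv j hj]
    have hm : (0:Int) < 10 ^ j + 1 := by positivity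
    by_cases hcond : (10:Int) ^ (j - 1) * (10 ^ j + 1) ≤ end_
    · rw [if_pos hcond]
      set m := (10:Int) ^ j + 1 with hmdef
      set lo := max ((10:Int) ^ (j - 1)) (-(PySem.Int.floordiv (-start) m)) with hlo
      set hi := min ((10:Int) ^ j - 1) (PySem.Int.floordiv end_ m) with hhi
      set ys := (PySem.List.pyRange lo (hi + 1)).map (fun h => h * m) with hys
      have hysmem : ∀ y, y ∈ ys ↔ pvBlock start end_ j y := by
        intro y
        simp only [hys, List.mem_map, PySem.List.mem_pyRange_one]
        unfold pvBlock
        constructor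
        · rintro ⟨h, ⟨h1, h2⟩, rfl⟩; exact ⟨h, h1, h2, rfl⟩
        · rintro ⟨h, h1, h2, rfl⟩; exact ⟨h, ⟨h1, h2⟩, rfl⟩
      have hyspw : ys.Pairwise (· < ·) := by
        refine List.Pairwise.map _ ?_ (PySem.List.pairwise_lt_pyRange_one lo (hi + 1))
        intro a b hab
        exact mul_lt_mul_of_pos_right hab hm
      have hysbound : ∀ y ∈ ys, (10:Int) ^ (j - 1) * m ≤ y ∧ y ≤ (10 ^ j - 1) * m := by
        intro y hy
        simp only [hys, List.mem_map, PySem.List.mem_pyRange_one] at hy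
        obtain ⟨h, ⟨h1, h2⟩, rfl⟩ := hy
        have hl : (10:Int) ^ (j - 1) ≤ h := le_trans (le_max_left _ _) h1
        have hr : h ≤ (10:Int) ^ j - 1 := by
          have : h ≤ hi := by omega
          exact le_trans this (min_le_left _ _)
        constructor
        · exact mul_le_mul_of_nonneg_right hl (by positivity) |>.trans_eq rfl
        · exact mul_le_mul_of_nonneg_right hr (by positivity) |>.trans_eq rfl
      have hfold : (PySem.List.pyRange lo (hi + 1)).foldl (fun r h => PySem.Set.add r (h * m)) acc
          = acc ++ ys := by
        rw [hys, ← List.foldl_map]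
        apply pvFoldAdd
        · intro y hy hmem
          have hb := hbound y hmem
          have := (hysbound y hy).1
          omega
        · exact hyspw.imp ne_of_lt
      rw [hfold, ← pow_succ]
      have hj1 : 1 ≤ j + 1 := by omega
      have hfuel' : end_ < 10 ^ (j + 1 - 1 + fuel) * (10 ^ (j + 1 + fuel) + 1) := by
        have he1 : j + 1 - 1 + fuel = j - 1 + (fuel + 1) := by omega
        have he2 : j + 1 + fuel = j + (fuel + 1) := by omega
        rw [he1, he2]; exact hfuel
      have hpw' : (acc ++ ys).Pairwise (· < ·) := by
        rw [List.pairwise_append]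
        refine ⟨hpw, hyspw, fun x hx y hy => ?_⟩
        have h1 := hbound x hx
        have h2 := (hysbound y hy).1
        omega
      have hbound' : ∀ x ∈ acc ++ ys, x < (10:Int) ^ (j + 1 - 1) * (10 ^ (j + 1) + 1) := by
        have hgt : ((10:Int) ^ j - 1) * m < 10 ^ (j + 1 - 1) * (10 ^ (j + 1) + 1) := by
          have e1 : j + 1 - 1 = j := by omega
          rw [e1, hmdef]
          have h10 : (0:Int) < 10 ^ j := by positivity
          have : (10:Int) ^ (j + 1) = 10 ^ j * 10 := by rw [pow_succ]
          nlinarith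
        intro x hx
        rcases List.mem_append.mp hx with hx | hx
        · have h1 := hbound x hx
          rw [hmdef] at h1
          have h2 := pvCondMono j (j + 1) hj (by omega)
          omega
        · have h2 := (hysbound x hx).2
          omega
      have hrec := ih (j + 1) (acc ++ ys) hj1 hfuel' hpw' hbound'
      refine ⟨hrec.1, fun n => ?_⟩
      rw [hrec.2 n]
      constructor
      · rintro (h | ⟨k, hk1, hk2⟩)
        · rcases List.mem_append.mp h with h | h
          · exact Or.inl h
          · exact Or.inr ⟨j, le_refl _, (hysmem n).mp h⟩
        · exact Or.inr ⟨k, by omega, hk2⟩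
      · rintro (h | ⟨k, hk1, hk2⟩)
        · exact Or.inl (List.mem_append.mpr (Or.inl h))
        · by_cases hkj : k = j
          · subst hkj
            exact Or.inl (List.mem_append.mpr (Or.inr ((hysmem n).mpr hk2)))
          · exact Or.inr ⟨k, by omega, hk2⟩
    · rw [if_neg hcond]
      refine ⟨hpw, fun n => ⟨fun h => Or.inl h, ?_⟩⟩
      rintro (h | ⟨k, hjk, hblk⟩)
      · exact h
      · exfalso
        obtain ⟨hlb, -, hub⟩ := pvBlock_bounds start end_ k n (by omega) hblk
        have := pvCondMono j k hj hjk
        omega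

lemma pvB_spec (start end_ : Int) :
    (find_invalid_alt start end_).Pairwise (· < ·) ∧
    (∀ n, n ∈ find_invalid_alt start end_ ↔ ∃ k, 1 ≤ k ∧ pvBlock start end_ k n) := by
  unfold find_invalid_alt
  have h10 : (10:Int) = 10 ^ 1 := by ring
  rw [h10]
  have hfuel : end_ < 10 ^ (1 - 1 + (end_.toNat + 1)) * (10 ^ (1 + (end_.toNat + 1)) + 1) := by
    have h1 : (end_ : Int) < 10 ^ (end_.toNat + 1) := by
      have h2 : end_.toNat < 10 ^ (end_.toNat + 1) := by
        calc end_.toNat < 10 ^ end_.toNat := Nat.lt_pow_self (by norm_num)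
        _ ≤ 10 ^ (end_.toNat + 1) := Nat.pow_le_pow_right (by norm_num) (by omega)
      have h3 : (end_ : Int) ≤ (end_.toNat : Int) := Int.self_le_toNat end_
      calc (end_ : Int) ≤ (end_.toNat : Int) := h3
        _ < ((10 ^ (end_.toNat + 1) : ℕ) : Int) := by exact_mod_cast h2
        _ = (10:Int) ^ (end_.toNat + 1) := by push_cast; ring
    have h4 : (1:Int) ≤ 10 ^ (1 + (end_.toNat + 1)) + 1 := by
      have : (0:Int) ≤ 10 ^ (1 + (end_.toNat + 1)) := by positivity
      omega
    calc end_ < 10 ^ (end_.toNat + 1) := h1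
      _ = 10 ^ (1 - 1 + (end_.toNat + 1)) := by norm_num
      _ ≤ 10 ^ (1 - 1 + (end_.toNat + 1)) * (10 ^ (1 + (end_.toNat + 1)) + 1) :=
          le_mul_of_one_le_right (by positivity) h4
  obtain ⟨h1, h2⟩ := pvLoop_spec start end_ (end_.toNat + 1) 1 [] (le_refl 1) hfuel
    (by simp) (by simp)
  exact ⟨h1, fun n => by rw [h2 n]; simp⟩

lemma pvQual_iff (n : Int) : pvQual n ↔
    ∃ k : ℕ, 1 ≤ k ∧ ∃ h : Int, 10 ^ (k - 1) ≤ h ∧ h < 10 ^ k ∧ n = h * (10 ^ k + 1) := by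
  unfold pvQual
  constructor
  · rintro ⟨k, h, hk, hlb, hub, rfl⟩
    refine ⟨k, hk, (h : Int), ?_, ?_, rfl⟩
    · exact_mod_cast Nat.cast_le.mpr hlb |>.trans_eq' (by push_cast; ring)
    · exact_mod_cast Nat.cast_lt.mpr hub |>.trans_eq (by push_cast; ring)
  · rintro ⟨k, hk, h, hlb, hub, rfl⟩
    have hpos : (0:Int) ≤ h := le_trans (by positivity) hlb
    refine ⟨k, h.toNat, hk, ?_, ?_, ?_⟩
    · have : ((10 ^ (k - 1) : ℕ) : Int) ≤ h := by push_cast; exact_mod_cast hlb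
      omega
    · have : h < ((10 ^ k : ℕ) : Int) := by push_cast; exact_mod_cast hub
      omega
    · have : ((h.toNat : Int)) = h := Int.toNat_of_nonneg hpos
      rw [this]

lemma pvBlock_iff (start end_ : Int) (n : Int) :
    (∃ k, 1 ≤ k ∧ pvBlock start end_ k n) ↔ (start ≤ n ∧ n < end_ + 1 ∧ pvQual n) := by
  constructor
  · rintro ⟨k, hk, hblk⟩
    obtain ⟨h, hlb, hub, hs, he, rfl⟩ := (pvBlock_iff' start end_ k _ hk).mp hblk
    exact ⟨hs, by omega, (pvQual_iff _).mpr ⟨k, hk, h, hlb, hub, rfl⟩⟩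
  · rintro ⟨hs, he, hq⟩
    obtain ⟨k, hk, h, hlb, hub, rfl⟩ := (pvQual_iff _).mp hq
    exact ⟨k, hk, (pvBlock_iff' start end_ k _ hk).mpr ⟨h, hlb, hub, hs, by omega, rfl⟩⟩

-- ===== VERDICT (by name: the statement is the Claim_ definition above) =====
theorem find_invalid_spec : Claim_equal_find_invalid := by
  intro start end_ _
  unfold Spec_find_invalid
  have hA := pvA_eq_filter start end_
  obtain ⟨hBpw, hBmem⟩ := pvB_spec start end_
  have hApw : (find_invalid start end_).Pairwise (· < ·) := by
    rw [hA]; exact (PySem.List.pairwise_lt_pyRange_one _ _).filter _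
  have hmem : ∀ n, n ∈ find_invalid start end_ ↔ n ∈ find_invalid_alt start end_ := by
    intro n
    rw [hA, List.mem_filter, PySem.List.mem_pyRange_one, hBmem, pvBlock_iff, pvCondA_iff]
    tauto
  have hperm : (find_invalid start end_).Perm (find_invalid_alt start end_) :=
    (List.perm_ext_iff_of_nodup (hApw.imp ne_of_lt) (hBpw.imp ne_of_lt)).mpr hmem
  exact PySem.List.eq_of_perm_of_pairwise_le_of_injective (fun x => x) (fun _ _ h => h)
    hperm (hApw.imp le_of_lt) (hBpw.imp le_of_lt)
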